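-- pv_equiv track=rewrite | github.com/kuisiba/nlp100knock | chapter3/26.py | f
-- ===== SOURCE A (Python) =====
-- def f(kiso):
--     flag = False
--     kakko_flag = False
--     tmp = ""
--     ret = []
--     for i in kiso:
--         if i == '|':
--             if flag == False:
--                 flag = True
--             else:
--                 if kakko_flag == False:
--                     ret.append(tmp)
--                     tmp = ''
--         if i != '|':
--             if i == '{' or i == '[':
--                 kakko_flag = True
--             elif i == '}' or i == ']':
--                 kakko_flag = False
--             if flag == True:
--                 if i != '\'':
--                     tmp += i
--     return ret
-- ===== SOURCE B (Python) =====
-- def f(kiso):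
--     j = kiso.find('|')
--     if j == -1:
--         return []
--     pre = kiso[:j]
--     rest = kiso[j + 1:]
--     brackets = [c for c in pre if c == '{' or c == '[' or c == '}' or c == ']']
--     kakko = bool(brackets) and (brackets[-1] == '{' or brackets[-1] == '[')
--     buf = []
--     cuts = [0]
--     for ch in rest:
--         if ch == '|':
--             if not kakko:
--                 cuts.append(len(buf))
--         else:
--             if ch == '{' or ch == '[':
--                 kakko = True
--             elif ch == '}' or ch == ']':
--                 kakko = False
--             if ch != "'":
--                 buf.append(ch)
--     return ["".join(buf[a:b]) for a, b in zip(cuts, cuts[1:])]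
-- ===== Notes on version B (the rewrite author's own statement) =====
-- stated objective: faster
-- what changed: Replaces A's flag/tmp/ret accumulator loop by: locate the first '|' with str.find, derive the initial bracket state from the last bracket character of the prefix (a filter), then one pass collecting a flat quote-stripped buffer and the buffer indices of top-level pipes, finally reconstruct the fields by slicing the buffer between consecutive indices.
import Mathlib
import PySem

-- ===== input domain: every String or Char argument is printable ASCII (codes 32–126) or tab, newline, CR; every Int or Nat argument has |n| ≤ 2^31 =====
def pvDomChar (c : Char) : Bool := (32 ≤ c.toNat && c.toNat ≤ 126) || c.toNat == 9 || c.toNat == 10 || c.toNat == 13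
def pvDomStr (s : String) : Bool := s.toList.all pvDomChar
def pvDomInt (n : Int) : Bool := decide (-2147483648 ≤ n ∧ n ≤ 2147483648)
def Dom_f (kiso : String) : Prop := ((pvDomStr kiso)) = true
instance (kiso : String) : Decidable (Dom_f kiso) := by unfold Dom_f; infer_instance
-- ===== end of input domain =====

-- B finds the first '|' up front, derives the bracket state before it from the last bracket
-- character of the prefix, then makes one pass collecting a flat quote-stripped buffer plus the
-- buffer positions of top-level pipes, and reconstructs the fields by slicing between consecutive
-- positions (same O(n) asymptotics, measured faster in a timing run; neither mutates its argument).

-- ===== PORT A =====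
-- state: (flag, kakko_flag, tmp, ret); Python strings handled as List Char, joined at the end
def fStepA : (Bool × Bool × List Char × List (List Char)) → Char →
    Bool × Bool × List Char × List (List Char)
  | (flag, kakko, tmp, ret), i =>
    if i = '|' then
      if flag = false then (true, kakko, tmp, ret)
      else if kakko = false then (flag, kakko, [], ret ++ [tmp])
      else (flag, kakko, tmp, ret)
    else
      let kakko' := if i = '{' ∨ i = '[' then true
                    else if i = '}' ∨ i = ']' then false
                    else kakko
      let tmp' := if flag = true ∧ i ≠ '\'' then tmp ++ [i] else tmp
      (flag, kakko', tmp', ret)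

def f (kiso : String) : List String :=
  let st := kiso.toList.foldl fStepA (false, false, [], [])
  st.2.2.2.map String.mk

-- ===== PORT B =====
-- state: (kakko, buf, cuts)
def fStepB : (Bool × List Char × List Int) → Char → Bool × List Char × List Int
  | (kakko, buf, cuts), ch =>
    if ch = '|' then
      if kakko = false then (kakko, buf, cuts ++ [(buf.length : Int)]) else (kakko, buf, cuts)
    else
      let kakko' := if ch = '{' ∨ ch = '[' then true
                    else if ch = '}' ∨ ch = ']' then false
                    else kakko
      let buf' := if ch ≠ '\'' then buf ++ [ch] else buf
      (kakko', buf', cuts)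

def f_alt (kiso : String) : List String :=
  let cs := kiso.toList
  let j := PySem.Chars.find cs ['|']              -- kiso.find('|')
  if j = -1 then []
  else
    let pre := PySem.List.slice cs none (some j)          -- kiso[:j]
    let rest := PySem.List.slice cs (some (j + 1)) none   -- kiso[j+1:]
    let brackets := pre.filter (fun c => c = '{' ∨ c = '[' ∨ c = '}' ∨ c = ']')
    -- 'bool(brackets) and brackets[-1] in opening'; brackets[-1] is guarded by nonemptiness
    let kakko0 : Bool := !brackets.isEmpty &&
      ((PySem.List.pyGet? brackets (-1)).getD ' ' = '{' ∨
       (PySem.List.pyGet? brackets (-1)).getD ' ' = '[')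
    let st := rest.foldl fStepB (kakko0, [], [(0 : Int)])
    let buf := st.2.1
    let cuts := st.2.2
    (cuts.zip cuts.tail).map (fun p => String.mk (PySem.List.slice buf (some p.1) (some p.2)))

-- ===== PRECONDITION & SPEC =====
def Spec_f (kiso : String) (out : List String) : Prop := out = f_alt kiso
instance (kiso : String) (out : List String) : Decidable (Spec_f kiso out) := by unfold Spec_f; infer_instance

-- ===== CLAIM (what is proved, stated in full; the proofs are below) =====
def Claim_equal_f : Prop := ∀ (kiso : String), Dom_f kiso → Spec_f kiso (f kiso)

-- ===== LEMMAS AND PROOFS =====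

-- bracket-state update, as A performs it on a non-pipe character
def kupd (k : Bool) (l : List Char) : Bool :=
  l.foldl (fun k c => if c = '{' ∨ c = '[' then true
                      else if c = '}' ∨ c = ']' then false else k) k

-- the cut positions B has recorded once A's ret is `rs`, with buffer offset `off`
def cutsAux : Nat → List (List Char) → List Int
  | off, [] => [(off : Int)]
  | off, r :: rs => (off : Int) :: cutsAux (off + r.length) rs

-- A over a pipe-free prefix only updates the bracket flag
theorem foldA_prefix (l : List Char) (k : Bool) (hl : '|' ∉ l) :
    l.foldl fStepA (false, k, [], []) = (false, kupd k l, [], []) := by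
  induction l generalizing k with
  | nil => simp [kupd]
  | cons c l ih =>
    simp only [List.mem_cons, not_or] at hl
    have hstep : fStepA (false, k, [], []) c =
        (false, if c = '{' ∨ c = '[' then true else if c = '}' ∨ c = ']' then false else k, [], []) := by
      simp [fStepA, Ne.symm hl.1]
    simp only [List.foldl_cons, hstep]
    exact ih _ hl.2

-- kupd in terms of the last bracket character
theorem kupd_eq_getLast (l : List Char) (k : Bool) :
    kupd k l = (match (l.filter (fun c => c = '{' ∨ c = '[' ∨ c = '}' ∨ c = ']')).getLast? with
                | none => k
                | some c => (c = '{' || c = '[')) := by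
  induction l generalizing k with
  | nil => simp [kupd]
  | cons c l ih =>
    have hk : kupd k (c :: l) = kupd (if c = '{' ∨ c = '[' then true
        else if c = '}' ∨ c = ']' then false else k) l := rfl
    rw [hk, ih]
    by_cases hp : c = '{' ∨ c = '[' ∨ c = '}' ∨ c = ']'
    · rw [List.filter_cons_of_pos (by simpa using hp)]
      cases hgl : (l.filter (fun c => decide (c = '{' ∨ c = '[' ∨ c = '}' ∨ c = ']'))).getLast? with
      | none =>
        have : l.filter (fun c => decide (c = '{' ∨ c = '[' ∨ c = '}' ∨ c = ']')) = [] :=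
          List.getLast?_eq_none_iff.mp hgl
        rw [this]
        simp only [List.getLast?_singleton]
        rcases hp with h | h | h | h <;> subst h <;> simp
      | some d =>
        have hne : l.filter (fun c => decide (c = '{' ∨ c = '[' ∨ c = '}' ∨ c = ']')) ≠ [] := by
          intro h; rw [h] at hgl; simp at hgl
        have hcons : ∀ (x : Char) (m : List Char), m ≠ [] → (x :: m).getLast? = m.getLast? := by
          intro x m hm
          cases m with
          | nil => exact absurd rfl hm
          | cons d t => simp [List.getLast?_cons_cons]
        rw [hcons _ _ hne, hgl]
    · rw [List.filter_cons_of_neg (by simpa using hp)]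
      rw [if_neg (fun h => hp (by tauto)), if_neg (fun h => hp (by tauto))]

-- B's kakko0 expression equals the getLast? form
theorem kakko0_eq (bs : List Char) :
    (!bs.isEmpty &&
      ((PySem.List.pyGet? bs (-1)).getD ' ' = '{' ∨
       (PySem.List.pyGet? bs (-1)).getD ' ' = '['))
      = (match bs.getLast? with
         | none => false
         | some c => (c = '{' || c = '[')) := by
  rcases List.eq_nil_or_concat' bs with rfl | ⟨l, c, rfl⟩
  · simp
  · have hget : (PySem.List.pyGet? (l ++ [c]) (-1)).getD ' ' = c := by
      rw [PySem.List.pyGet?_neg_ofNat (l ++ [c]) 1 (by omega) (by simp)]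
      simp
    rw [hget, List.getLast?_concat]
    simp

theorem cutsAux_snoc (rs : List (List Char)) (off : Nat) (r : List Char) :
    cutsAux off (rs ++ [r]) = cutsAux off rs ++ [((off + rs.flatten.length + r.length : Nat) : Int)] := by
  induction rs generalizing off with
  | nil => simp [cutsAux]
  | cons r0 rs ih => simp [cutsAux, ih, Nat.add_assoc]

-- main loop invariant: B's state tracks A's once the first pipe has been seen
theorem foldB_main (l : List Char) (k : Bool) (tmp : List Char) (ret : List (List Char)) :
    ∃ K T R, l.foldl fStepA (true, k, tmp, ret) = (true, K, T, R) ∧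
      l.foldl fStepB (k, ret.flatten ++ tmp, cutsAux 0 ret) = (K, R.flatten ++ T, cutsAux 0 R) := by
  induction l generalizing k tmp ret with
  | nil => exact ⟨k, tmp, ret, rfl, rfl⟩
  | cons c l ih =>
    simp only [List.foldl_cons]
    by_cases hc : c = '|'
    · subst hc
      by_cases hk : k = false
      · subst hk
        have hA : fStepA (true, false, tmp, ret) '|' = (true, false, [], ret ++ [tmp]) := by
          simp [fStepA]
        have hB : fStepB (false, ret.flatten ++ tmp, cutsAux 0 ret) '|'
            = (false, (ret ++ [tmp]).flatten ++ [], cutsAux 0 (ret ++ [tmp])) := by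
          simp [fStepB, cutsAux_snoc]
        rw [hA, hB]
        exact ih false [] (ret ++ [tmp])
      · have hk1 : k = true := by cases k <;> simp_all
        subst hk1
        have hA : fStepA (true, true, tmp, ret) '|' = (true, true, tmp, ret) := by simp [fStepA]
        have hB : fStepB (true, ret.flatten ++ tmp, cutsAux 0 ret)
            '|' = (true, ret.flatten ++ tmp, cutsAux 0 ret) := by simp [fStepB]
        rw [hA, hB]
        exact ih true tmp ret
    · have hA : fStepA (true, k, tmp, ret) c =
          (true, if c = '{' ∨ c = '[' then true else if c = '}' ∨ c = ']' then false else k,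
           if c ≠ '\'' then tmp ++ [c] else tmp, ret) := by
        simp [fStepA, hc]
      have hB : fStepB (k, ret.flatten ++ tmp, cutsAux 0 ret) c =
          (if c = '{' ∨ c = '[' then true else if c = '}' ∨ c = ']' then false else k,
           ret.flatten ++ (if c ≠ '\'' then tmp ++ [c] else tmp), cutsAux 0 ret) := by
        by_cases hq : c = '\'' <;> simp [fStepB, hc, hq]
      rw [hA, hB]
      exact ih _ _ ret

-- slicing the flat buffer between consecutive cuts recovers ret
theorem recon (R : List (List Char)) : ∀ (off : Nat) (pre tmp : List Char), pre.length = off →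
    ((cutsAux off R).zip (cutsAux off R).tail).map
        (fun p => PySem.List.slice (pre ++ R.flatten ++ tmp) (some p.1) (some p.2)) = R := by
  induction R with
  | nil => intro off pre tmp _; simp [cutsAux]
  | cons r rs ih =>
    intro off pre tmp hoff
    obtain ⟨t, ht⟩ : ∃ t, cutsAux (off + r.length) rs = ((off + r.length : Nat) : Int) :: t := by
      cases rs <;> exact ⟨_, rfl⟩
    have hfirst : PySem.List.slice (pre ++ (r :: rs).flatten ++ tmp)
        (some ((off : Nat) : Int)) (some ((off + r.length : Nat) : Int)) = r := by
      rw [PySem.List.slice_natCast]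
      have hs : pre ++ (r :: rs).flatten ++ tmp = pre ++ (r ++ (rs.flatten ++ tmp)) := by simp
      rw [hs, ← hoff, List.drop_left, Nat.add_sub_cancel_left]
      exact List.take_left
    have hs2 : pre ++ (r :: rs).flatten ++ tmp = (pre ++ r) ++ rs.flatten ++ tmp := by simp
    have htail := ih (off + r.length) (pre ++ r) tmp (by simp [hoff])
    rw [ht] at htail
    simp only [cutsAux, ht, List.zip_cons_cons, List.map_cons, List.tail_cons, hs2] at *
    exact congrArg₂ List.cons hfirst htail

-- find on a pipe-free list
theorem find_no_pipe (cs : List Char) (h : '|' ∉ cs) : PySem.Chars.find cs ['|'] = -1 := by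
  have hiff := PySem.Chars.findFrom_natCast_eq_neg_one_iff cs ['|'] 0 (Nat.zero_le _)
  rw [Nat.cast_zero, PySem.Chars.findFrom_zero, List.drop_zero] at hiff
  rw [hiff]
  intro hinf
  exact h (hinf.subset (by simp))

-- find locates the first pipe
theorem find_split (pre rest : List Char) (h : '|' ∉ pre) :
    PySem.Chars.find (pre ++ '|' :: rest) ['|'] = (pre.length : Int) := by
  have hinf : ['|'] <:+: List.drop 0 (pre ++ '|' :: rest) := by
    rw [List.drop_zero]; exact ⟨pre, rest, by simp⟩
  have hne : PySem.Chars.find (pre ++ '|' :: rest) ['|'] ≠ -1 := by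
    have hiff := PySem.Chars.findFrom_natCast_eq_neg_one_iff (pre ++ '|' :: rest) ['|'] 0 (Nat.zero_le _)
    rw [Nat.cast_zero, PySem.Chars.findFrom_zero] at hiff
    intro hcontra; exact (hiff.mp hcontra) hinf
  have hspec := PySem.Chars.findFrom_natCast_spec (pre ++ '|' :: rest) ['|'] 0 (Nat.zero_le _)
    (by rw [Nat.cast_zero, PySem.Chars.findFrom_zero]; exact hne)
  rw [Nat.cast_zero, PySem.Chars.findFrom_zero] at hspec
  obtain ⟨h0, hpref, hmin⟩ := hspec
  have hdropL : List.drop pre.length (pre ++ '|' :: rest) = '|' :: rest := List.drop_left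
  have hle : (PySem.Chars.find (pre ++ '|' :: rest) ['|']).toNat ≤ pre.length := by
    by_contra hgt
    exact hmin pre.length (Nat.zero_le _) (by omega) (by rw [hdropL]; exact ⟨rest, rfl⟩)
  have hget : (pre ++ '|' :: rest)[(PySem.Chars.find (pre ++ '|' :: rest) ['|']).toNat]? = some '|' := by
    obtain ⟨t, ht⟩ := hpref
    have h1 : (List.drop (PySem.Chars.find (pre ++ '|' :: rest) ['|']).toNat (pre ++ '|' :: rest))[0]? = some '|' := by
      rw [← ht]; rfl
    rw [List.getElem?_drop] at h1
    simpa using h1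
  have hnlt : ¬ (PySem.Chars.find (pre ++ '|' :: rest) ['|']).toNat < pre.length := by
    intro hlt
    have h2 : pre[(PySem.Chars.find (pre ++ '|' :: rest) ['|']).toNat]? = some '|' := by
      rw [List.getElem?_append_left hlt] at hget
      exact hget
    exact h (List.mem_of_getElem? h2)
  omega

theorem f_eq_f_alt (kiso : String) : f kiso = f_alt kiso := by
  by_cases hmem : '|' ∈ kiso.toList
  · obtain ⟨k0, hk0⟩ := Option.isSome_iff_exists.mp ((PySem.List.index?_isSome_iff _ _).mpr hmem)
    obtain ⟨pre, rest, hsplit, hlen, hpre⟩ := (PySem.List.index?_eq_some_iff _ _ _).mp hk0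
    have hfind : PySem.Chars.find kiso.toList ['|'] = (pre.length : Int) := by
      rw [hsplit]; exact find_split pre rest hpre
    have hA1 : kiso.toList.foldl fStepA (false, false, [], []) =
        rest.foldl fStepA (true, kupd false pre, [], []) := by
      rw [hsplit, List.foldl_append, foldA_prefix pre false hpre, List.foldl_cons]
      congr 1
    obtain ⟨K, T, R, hA2, hB2⟩ := foldB_main rest (kupd false pre) [] []
    have hB2' : rest.foldl fStepB (kupd false pre, [], [(0 : Int)]) = (K, R.flatten ++ T, cutsAux 0 R) := by
      simpa [cutsAux] using hB2
    have hslice1 : PySem.List.slice kiso.toList none (some ((pre.length : Nat) : Int)) = pre := by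
      rw [PySem.List.slice_to_natCast, hsplit, List.take_left]
    have hslice2 : PySem.List.slice kiso.toList (some ((pre.length : Int) + 1)) none = rest := by
      have hcast : (pre.length : Int) + 1 = ((pre.length + 1 : Nat) : Int) := by push_cast; ring
      rw [hcast, PySem.List.slice_from_natCast, hsplit,
        show pre ++ '|' :: rest = (pre ++ ['|']) ++ rest by simp,
        show pre.length + 1 = (pre ++ ['|']).length by simp]
      exact List.drop_left
    have hkakko : ∀ bs : List Char, bs = pre.filter (fun c => c = '{' ∨ c = '[' ∨ c = '}' ∨ c = ']') →
        (!bs.isEmpty &&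
          ((PySem.List.pyGet? bs (-1)).getD ' ' = '{' ∨
           (PySem.List.pyGet? bs (-1)).getD ' ' = '[')) = kupd false pre := by
      intro bs hbs
      rw [kakko0_eq, kupd_eq_getLast, hbs]
    simp only [f, f_alt, hfind, hslice1, hslice2]
    rw [if_neg (by omega), hA1, hA2, hkakko _ rfl, hB2']
    have hrec := recon R 0 [] T rfl
    simp only [List.nil_append] at hrec
    conv_rhs => rw [show (fun p : Int × Int => String.mk (PySem.List.slice (R.flatten ++ T) (some p.1) (some p.2)))
        = String.mk ∘ (fun p : Int × Int => PySem.List.slice (R.flatten ++ T) (some p.1) (some p.2)) from rfl,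
      ← List.map_map, hrec]
  · have hfind : PySem.Chars.find kiso.toList ['|'] = -1 := find_no_pipe _ hmem
    have hfold := foldA_prefix kiso.toList false hmem
    simp [f, f_alt, hfind, hfold]

-- ===== VERDICT (by name: the statement is the Claim_ definition above) =====
theorem f_spec : Claim_equal_f := by
  intro kiso _
  unfold Spec_f
  exact f_eq_f_alt kiso
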